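-- pv_equiv track=rewrite | github.com/KaloyanH/Python-SoftUni-Exams-and-Exam-Preparations- | SoftUni Algorithms with Python/Exam Prep 13 August 2023/sum_finder.py | find_valid_subsets
-- ===== SOURCE A (Python) =====
-- def find_valid_subsets(nums, target):
--     def backtrack(start, subset, current_sum):
--         if current_sum <= target:
--             result.append(subset[:])
--         for i in range(start, len(nums)):
--             subset.append(nums[i])
--             current_sum += nums[i]
--             backtrack(i + 1, subset, current_sum)
--             subset.pop()
--             current_sum -= nums[i]
--
--     result = []
--     backtrack(0, [], 0)
--     return result
-- ===== SOURCE B (Python) =====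
-- def find_valid_subsets(nums, target):
--     result = []
--     stack = [(0, [], 0)]
--     while stack:
--         start, subset, current_sum = stack.pop()
--         if current_sum <= target:
--             result.append(subset)
--         for i in reversed(range(start, len(nums))):
--             stack.append((i + 1, subset + [nums[i]], current_sum + nums[i]))
--     return result
-- ===== Notes on version B (the rewrite author's own statement) =====
-- stated objective: alternative
-- what changed: Replaced the mutating recursive backtracking with an iterative DFS driven by an explicit stack of (start, subset, current_sum) frames, pushing children in reverse index order to reproduce the same preorder.
import Mathlib
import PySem

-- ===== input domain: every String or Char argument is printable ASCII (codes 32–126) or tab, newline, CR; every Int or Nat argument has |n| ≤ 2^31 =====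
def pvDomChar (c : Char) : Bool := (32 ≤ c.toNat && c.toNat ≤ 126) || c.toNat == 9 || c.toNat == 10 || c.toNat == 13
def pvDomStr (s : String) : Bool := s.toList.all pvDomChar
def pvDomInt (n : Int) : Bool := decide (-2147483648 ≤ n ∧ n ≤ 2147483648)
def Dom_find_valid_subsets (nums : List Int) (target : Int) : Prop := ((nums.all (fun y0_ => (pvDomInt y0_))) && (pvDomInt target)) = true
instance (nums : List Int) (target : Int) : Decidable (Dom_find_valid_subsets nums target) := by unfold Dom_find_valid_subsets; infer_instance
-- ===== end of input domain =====

-- B replaces A's mutating recursive backtracking by an iterative DFS over an explicit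
-- stack of (start, subset, current_sum) frames (children pushed in reverse index order);
-- objective: alternative decomposition, same enumeration order.

-- ===== PORT A =====
-- backtrack(start, subset, current_sum): emits subset when current_sum <= target, then
-- loops i = start .. len(nums)-1 recursing on (i+1, subset+[nums[i]], current_sum+nums[i]).
def pvBacktrack (nums : List Int) (target : Int) (start : Nat) (subset : List Int)
    (csum : Int) : List (List Int) :=
  (if csum ≤ target then [subset] else []) ++
    ((List.range' start (nums.length - start)).attach.flatMap fun i =>
      pvBacktrack nums target (i.1 + 1) (subset ++ [nums.getD i.1 0]) (csum + nums.getD i.1 0))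
termination_by nums.length - start
decreasing_by
  have h := List.mem_range'.mp i.2
  omega

def find_valid_subsets (nums : List Int) (target : Int) : List (List Int) :=
  pvBacktrack nums target 0 [] 0

-- ===== PORT B =====
-- the for-loop over reversed(range(start, len(nums))) pushing frames onto the stack
-- (lemma used by runB's termination proof, so it stays above the port)
theorem pvPush_foldl {α β : Type} (f : α → β) :
    ∀ (L : List α) (st : List β), L.foldl (fun st i => f i :: st) st = (L.map f).reverse ++ st := by
  intro L
  induction L with
  | nil => intro st; simp
  | cons a L ih => intro st; simp [List.foldl, ih]

theorem pvPowSum : ∀ (m s n : Nat), n = s + m →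
    ((List.range' s m).map (fun i => 2 ^ (n - (i + 1)))).sum = 2 ^ m - 1 := by
  intro m
  induction m with
  | zero => intro s n _; simp
  | succ k ih =>
    intro s n hn
    rw [List.range'_succ]
    have hk := ih (s + 1) n (by omega)
    have hpow : n - (s + 1) = k := by omega
    simp only [List.map_cons, List.sum_cons, hk, hpow]
    have : 1 ≤ 2 ^ k := Nat.one_le_two_pow
    rw [pow_succ]
    omega

-- iterative DFS: pop a frame, emit its subset if current_sum <= target, push children
def pvRunStack (nums : List Int) (target : Int) :
    List (Nat × List Int × Int) → List (List Int) → List (List Int)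
  | [], acc => acc
  | (start, subset, csum) :: rest, acc =>
    let acc' := if csum ≤ target then acc ++ [subset] else acc
    let stack' := ((List.range' start (nums.length - start)).reverse).foldl
      (fun st i => (i + 1, subset ++ [nums.getD i 0], csum + nums.getD i 0) :: st) rest
    pvRunStack nums target stack' acc'
termination_by stack _ => (stack.map (fun fr => 2 ^ (nums.length - fr.1))).sum
decreasing_by
  simp only [pvPush_foldl, List.map_append, List.sum_append, List.map_reverse,
    List.sum_reverse, List.map_map, List.map_cons, List.sum_cons]
  have h := pvPowSum (nums.length - start) start (max nums.length start) (by omega)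
  have hcong : ((List.range' start (nums.length - start)).map
      (fun i => 2 ^ (nums.length - (i + 1)))).sum
      = ((List.range' start (nums.length - start)).map
      (fun i => 2 ^ (max nums.length start - (i + 1)))).sum := by
    apply congrArg
    apply List.map_congr_left
    intro i hi
    have := List.mem_range'.mp hi
    have : nums.length - (i + 1) = max nums.length start - (i + 1) := by omega
    rw [this]
  have h1 : 1 ≤ 2 ^ (nums.length - start) := Nat.one_le_two_pow
  have hle : ((List.range' start (nums.length - start)).map
      (fun i => 2 ^ (nums.length - (i + 1)))).sum = 2 ^ (nums.length - start) - 1 := by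
    rw [hcong, h]
  simp only [Function.comp_def] at *
  omega

def find_valid_subsets_alt (nums : List Int) (target : Int) : List (List Int) :=
  pvRunStack nums target [(0, ([], 0))] []

-- ===== PRECONDITION & SPEC =====
def Spec_find_valid_subsets (nums : List Int) (target : Int) (out : List (List Int)) : Prop := out = find_valid_subsets_alt nums target
instance (nums : List Int) (target : Int) (out : List (List Int)) : Decidable (Spec_find_valid_subsets nums target out) := by unfold Spec_find_valid_subsets; infer_instance

-- ===== CLAIM (what is proved, stated in full; the proofs are below) =====
def Claim_equal_find_valid_subsets : Prop := ∀ (nums : List Int) (target : Int), Dom_find_valid_subsets nums target → Spec_find_valid_subsets nums target (find_valid_subsets nums target)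

-- ===== LEMMAS AND PROOFS =====

-- the stack loop evaluates each frame by A's backtracking, in order
theorem pvRunStack_eq (nums : List Int) (target : Int) :
    ∀ (stack : List (Nat × List Int × Int)) (acc : List (List Int)),
    pvRunStack nums target stack acc
      = acc ++ stack.flatMap (fun fr => pvBacktrack nums target fr.1 fr.2.1 fr.2.2) := by
  intro stack acc
  fun_induction pvRunStack nums target stack acc with
  | case1 acc => simp
  | case2 start subset csum rest acc acc' stack' ih =>
    simp only [stack', acc'] at ih ⊢
    simp only [pvPush_foldl] at ih ⊢
    rw [ih]
    simp only [List.flatMap_cons, List.flatMap_append,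
      List.map_reverse, List.reverse_reverse, List.flatMap_map]
    rw [pvBacktrack]
    by_cases h : csum ≤ target <;> simp [h]

-- ===== VERDICT (by name: the statement is the Claim_ definition above) =====
theorem find_valid_subsets_spec : Claim_equal_find_valid_subsets := by
  intro nums target _
  unfold Spec_find_valid_subsets find_valid_subsets find_valid_subsets_alt
  rw [pvRunStack_eq]
  simp
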